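-- pv_equiv track=rewrite | github.com/agatho/ida-wow-analyzer | analyzers/function_similarity.py | _suggest_handler_template
-- ===== SOURCE A (Python) =====
-- def _suggest_handler_template(handler_members, shared_callees):
--     """Suggest a template name for a group of similar handlers."""
--     names = [name for _, name in handler_members]
--
--     # Find common prefix among handler names
--     if len(names) >= 2:
--         # Try to find the longest common prefix
--         prefix = names[0]
--         for name in names[1:]:
--             while prefix and not name.startswith(prefix):
--                 prefix = prefix[:-1]
--             if not prefix:
--                 break
--
--         if len(prefix) > 5:
--             return f"HandleGeneric{prefix.rstrip('_')}()"
--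
--     # Try to find common substring in callee names
--     if shared_callees:
--         for callee in shared_callees:
--             if any(kw in callee for kw in
--                    ["Read", "Write", "Send", "Process", "Handle"]):
--                 return f"HandleCommon_{callee}()"
--
--     return "HandleCommonStructure()"
-- ===== SOURCE B (Python) =====
-- def _suggest_handler_template(handler_members, shared_callees):
--     """Suggest a template name for a group of similar handlers."""
--     names = [name for _, name in handler_members]
--
--     if len(names) >= 2:
--         # column-wise longest common prefix: walk the columns of zip(*names)
--         prefix_chars = []
--         for cols in zip(*names):
--             if all(c == cols[0] for c in cols):
--                 prefix_chars.append(cols[0])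
--             else:
--                 break
--         prefix = ''.join(prefix_chars)
--         if len(prefix) > 5:
--             return f"HandleGeneric{prefix.rstrip('_')}()"
--
--     for callee in shared_callees:
--         if any(kw in callee for kw in ("Read", "Write", "Send", "Process", "Handle")):
--             return f"HandleCommon_{callee}()"
--     return "HandleCommonStructure()"
-- ===== Notes on version B (the rewrite author's own statement) =====
-- stated objective: idiomatic
-- what changed: The longest common prefix is computed column-wise over zip(*names), building the prefix character by character, instead of A's per-name suffix-trimming loop that repeatedly shrinks a candidate prefix; the redundant 'if shared_callees' guard is dropped.
import Mathlib
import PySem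

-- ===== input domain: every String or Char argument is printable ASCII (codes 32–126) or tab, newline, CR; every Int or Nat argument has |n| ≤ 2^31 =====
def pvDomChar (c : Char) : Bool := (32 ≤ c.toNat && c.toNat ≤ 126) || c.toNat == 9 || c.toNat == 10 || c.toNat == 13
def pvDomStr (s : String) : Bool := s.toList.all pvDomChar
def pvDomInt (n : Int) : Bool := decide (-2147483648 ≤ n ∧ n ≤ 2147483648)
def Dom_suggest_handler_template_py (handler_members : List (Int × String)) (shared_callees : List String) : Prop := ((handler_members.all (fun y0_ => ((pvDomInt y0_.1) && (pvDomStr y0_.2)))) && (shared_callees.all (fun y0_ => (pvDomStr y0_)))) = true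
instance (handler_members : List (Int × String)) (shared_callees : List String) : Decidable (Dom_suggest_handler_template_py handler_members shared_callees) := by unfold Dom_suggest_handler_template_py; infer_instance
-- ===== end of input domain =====

-- B replaces A's suffix-trimming common-prefix loop by a column-wise common-prefix
-- computation (zip over the name columns); same results, more idiomatic.

-- ===== PORT A =====

-- str.rstrip('_'): drop all trailing '_' characters (exact for this fixed chars argument)
def pvRstripU (l : List Char) : List Char := (l.reverse.dropWhile (fun c => c = '_')).reverse

-- shared callee scan: "for callee in shared_callees: if any(kw in callee ...): return ..."
-- (this loop is textually identical in A and B)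
def pvForScan : List String → String
  | [] => "HandleCommonStructure()"
  | c :: rest =>
      if (["Read", "Write", "Send", "Process", "Handle"] : List String).any
           (fun kw => PySem.Chars.isIn kw.toList c.toList) then
        String.ofList ("HandleCommon_".toList ++ c.toList ++ "()".toList)
      else pvForScan rest

-- A's "if shared_callees:" guard around the loop
def pvScanGuard (sc : List String) : String :=
  if sc ≠ [] then pvForScan sc else "HandleCommonStructure()"

-- A's inner while loop: "while prefix and not name.startswith(prefix): prefix = prefix[:-1]"
def pvShrink (p n : List Char) : List Char :=
  if h : p ≠ [] ∧ ¬ (PySem.Chars.startswith n p = true) then pvShrink p.dropLast n else p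
termination_by p.length
decreasing_by
  have : p ≠ [] := h.1
  cases p with
  | nil => exact absurd rfl this
  | cons a as => simp [List.length_dropLast]

-- A's outer for loop with the early "if not prefix: break"
def pvLoopA (p : List Char) : List (List Char) → List Char
  | [] => p
  | n :: ns => let p' := pvShrink p n; if p' = [] then p' else pvLoopA p' ns

def suggest_handler_template_py (handler_members : List (Int × String)) (shared_callees : List String) : String :=
  let names := handler_members.map (fun y => y.2)
  match names with
  | n0 :: n1 :: rest =>
      let prefx := pvLoopA n0.toList ((n1 :: rest).map String.toList)
      if prefx.length > 5 then
        String.ofList ("HandleGeneric".toList ++ pvRstripU prefx ++ "()".toList)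
      else pvScanGuard shared_callees
  | _ => pvScanGuard shared_callees

-- ===== PORT B =====

-- B's str.rstrip('_') (same fixed-argument hand port as A's)
def pvRstripUB (l : List Char) : List Char := (l.reverse.dropWhile (fun c => c = '_')).reverse

-- B's callee scan loop (B has no "if shared_callees:" guard around it)
def pvForScanB : List String → String
  | [] => "HandleCommonStructure()"
  | c :: rest =>
      if (["Read", "Write", "Send", "Process", "Handle"] : List String).any
           (fun kw => PySem.Chars.isIn kw.toList c.toList) then
        String.ofList ("HandleCommon_".toList ++ c.toList ++ "()".toList)
      else pvForScanB rest

-- column-wise longest common prefix: "for cols in zip(*names): if all equal, append cols[0] else break"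
def pvColLCP : List (List Char) → List Char
  | [] => []
  | [] :: _ => []
  | (c :: xs) :: rest =>
      if rest.all (fun l => l.head? = some c) then c :: pvColLCP (xs :: rest.map List.tail)
      else []
termination_by ls => (ls.headD []).length
decreasing_by simp

def suggest_handler_template_py_alt (handler_members : List (Int × String)) (shared_callees : List String) : String :=
  let names := handler_members.map (fun y => y.2)
  if 2 ≤ names.length then
    let prefx := pvColLCP (names.map String.toList)
    if prefx.length > 5 then
      String.ofList ("HandleGeneric".toList ++ pvRstripUB prefx ++ "()".toList)
    else pvForScanB shared_callees
  else pvForScanB shared_callees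

-- ===== PRECONDITION & SPEC =====
def Spec_suggest_handler_template_py (handler_members : List (Int × String)) (shared_callees : List String) (out : String) : Prop := out = suggest_handler_template_py_alt handler_members shared_callees
instance (handler_members : List (Int × String)) (shared_callees : List String) (out : String) : Decidable (Spec_suggest_handler_template_py handler_members shared_callees out) := by unfold Spec_suggest_handler_template_py; infer_instance

-- ===== CLAIM (what is proved, stated in full; the proofs are below) =====
def Claim_equal_suggest_handler_template_py : Prop := ∀ (handler_members : List (Int × String)) (shared_callees : List String), Dom_suggest_handler_template_py handler_members shared_callees → Spec_suggest_handler_template_py handler_members shared_callees (suggest_handler_template_py handler_members shared_callees)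

-- ===== LEMMAS AND PROOFS =====

-- pairwise longest common prefix (proof-side characterisation of both loops)
def lcp : List Char → List Char → List Char
  | a :: as, b :: bs => if a = b then a :: lcp as bs else []
  | _, _ => []

theorem lcp_nil_left (n : List Char) : lcp [] n = [] := by cases n <;> rfl

theorem lcp_of_prefix {p n : List Char} (h : p <+: n) : lcp p n = p := by
  induction p generalizing n with
  | nil => exact lcp_nil_left n
  | cons a as ih =>
    cases n with
    | nil => simp at h
    | cons b bs =>
      rw [List.cons_prefix_cons] at h
      simp [lcp, h.1, ih h.2]

theorem lcp_prefix_left (p n : List Char) : lcp p n <+: p := by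
  induction p generalizing n with
  | nil => simp [lcp_nil_left]
  | cons a as ih =>
    cases n with
    | nil => simp [lcp]
    | cons b bs =>
      by_cases hab : a = b
      · simpa [lcp, hab] using ih bs
      · simp [lcp, hab]

theorem lcp_prefix_right (p n : List Char) : lcp p n <+: n := by
  induction p generalizing n with
  | nil => simp [lcp_nil_left]
  | cons a as ih =>
    cases n with
    | nil => simp [lcp]
    | cons b bs =>
      by_cases hab : a = b
      · subst hab; simpa [lcp] using ih bs
      · simp [lcp, hab]

theorem lcp_dropLast {p n : List Char} (h : ¬ p <+: n) : lcp p.dropLast n = lcp p n := by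
  induction p generalizing n with
  | nil => simp at h
  | cons a as ih =>
    cases n with
    | nil =>
      cases as with
      | nil => simp [lcp, lcp_nil_left]
      | cons x xs => simp [lcp]
    | cons b bs =>
      by_cases hab : a = b
      · subst hab
        cases as with
        | nil => simp [List.cons_prefix_cons] at h
        | cons x xs =>
          have has : ¬ (x :: xs) <+: bs := by
            intro hpre; exact h (by simp [List.cons_prefix_cons, hpre])
          simpa [lcp] using ih has
      · cases as with
        | nil => simp [lcp, lcp_nil_left, hab]
        | cons x xs => simp [lcp, hab]

theorem pvShrink_eq_lcp (p n : List Char) : pvShrink p n = lcp p n := by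
  fun_induction pvShrink p n with
  | case1 p h ih =>
    rw [ih, lcp_dropLast (fun hpre => h.2 ((PySem.Chars.startswith_iff _ _).mpr hpre))]
  | case2 p h =>
    by_cases hp : p = []
    · simp [hp, lcp_nil_left]
    · have hs := of_not_not (fun hn => h ⟨hp, hn⟩)
      exact (lcp_of_prefix ((PySem.Chars.startswith_iff _ _).mp hs)).symm

theorem foldl_lcp_nil (ns : List (List Char)) : ns.foldl lcp [] = [] := by
  induction ns with
  | nil => rfl
  | cons n ns ih => simpa [lcp_nil_left] using ih

theorem pvLoopA_eq_foldl (ns : List (List Char)) (p : List Char) :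
    pvLoopA p ns = ns.foldl lcp p := by
  induction ns generalizing p with
  | nil => rfl
  | cons n ns ih =>
    simp only [pvLoopA, pvShrink_eq_lcp, List.foldl_cons]
    by_cases hz : lcp p n = []
    · simp [hz, foldl_lcp_nil]
    · simp [hz, ih]

theorem foldl_lcp_heads {ns : List (List Char)} {c : Char}
    (h : ∀ l ∈ ns, l.head? = some c) (xs : List Char) :
    ns.foldl lcp (c :: xs) = c :: (ns.map List.tail).foldl lcp xs := by
  induction ns generalizing xs with
  | nil => rfl
  | cons n ns ih =>
    have hn : n.head? = some c := h n (by simp)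
    cases n with
    | nil => simp at hn
    | cons d t =>
      have hrest : ∀ l ∈ ns, l.head? = some c := fun l hl => h l (by simp [hl])
      have hd : d = c := by simpa using hn
      subst hd
      simp [lcp, ih hrest]

theorem foldl_lcp_prefix_acc (ns : List (List Char)) (acc : List Char) :
    ns.foldl lcp acc <+: acc := by
  induction ns generalizing acc with
  | nil => simp
  | cons n ns ih => exact (ih (lcp acc n)).trans (lcp_prefix_left acc n)

theorem foldl_lcp_prefix_mem {ns : List (List Char)} {l : List Char} (hl : l ∈ ns)
    (acc : List Char) : ns.foldl lcp acc <+: l := by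
  induction ns generalizing acc with
  | nil => simp at hl
  | cons n ns ih =>
    rcases List.mem_cons.mp hl with h | h
    · subst h
      exact (foldl_lcp_prefix_acc ns (lcp acc l)).trans (lcp_prefix_right acc l)
    · exact ih h (lcp acc n)

theorem foldl_lcp_eq_col (p : List Char) : ∀ ns : List (List Char),
    ns.foldl lcp p = pvColLCP (p :: ns) := by
  induction p with
  | nil => intro ns; rw [foldl_lcp_nil, pvColLCP]
  | cons c xs ih =>
    intro ns
    rw [pvColLCP]
    by_cases hall : ns.all (fun l => l.head? = some c)
    · rw [if_pos hall]
      have h : ∀ l ∈ ns, l.head? = some c := by simpa [List.all_eq_true] using hall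
      rw [foldl_lcp_heads h xs, ih (ns.map List.tail)]
    · rw [if_neg hall]
      obtain ⟨l, hl, hhead⟩ : ∃ l ∈ ns, ¬ l.head? = some c := by
        simpa [List.all_eq_true] using hall
      have h1 := foldl_lcp_prefix_acc ns (c :: xs)
      have h2 := foldl_lcp_prefix_mem hl (c :: xs)
      cases hr : ns.foldl lcp (c :: xs) with
      | nil => rfl
      | cons d r =>
        rw [hr] at h1 h2
        have hd : d = c := (List.cons_prefix_cons.mp h1).1
        subst hd
        rcases h2 with ⟨t, ht⟩
        exact absurd (by simp [← ht]) hhead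

theorem pvForScan_eq (sc : List String) : pvForScan sc = pvForScanB sc := by
  induction sc with
  | nil => rfl
  | cons c rest ih => simp only [pvForScan, pvForScanB, ih]

theorem pvScanGuard_eq (sc : List String) : pvScanGuard sc = pvForScanB sc := by
  cases sc with
  | nil => rfl
  | cons c rest => simp [pvScanGuard, pvForScan_eq]

theorem pvRstripU_eq (l : List Char) : pvRstripU l = pvRstripUB l := rfl

-- ===== VERDICT (by name: the statement is the Claim_ definition above) =====
theorem suggest_handler_template_py_spec : Claim_equal_suggest_handler_template_py := by
  intro hm sc _
  unfold Spec_suggest_handler_template_py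
  unfold suggest_handler_template_py suggest_handler_template_py_alt
  cases hm with
  | nil => simpa using pvScanGuard_eq sc
  | cons h0 hm' =>
    cases hm' with
    | nil => simpa using pvScanGuard_eq sc
    | cons h1 rest =>
      simp only [List.map_cons, List.length_cons]
      rw [pvLoopA_eq_foldl, foldl_lcp_eq_col, pvScanGuard_eq, pvRstripU_eq,
          if_pos (show 2 ≤ (List.map (fun y => y.2) rest).length + 1 + 1 by omega)]
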